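-- pv_equiv track=rewrite | github.com/bbronek/university | semestr VI/sheduling/lab6/task1.py | spt_scheduling
-- ===== SOURCE A (Python) =====
-- def spt_scheduling(m, n, processing_times):
--     sorted_jobs = sorted(range(n), key=lambda x: processing_times[x])
--     machine_loads = [0] * m
--     job_completion_times = [0] * n
--
--     for job in sorted_jobs:
--         machine_idx = machine_loads.index(min(machine_loads))
--         machine_loads[machine_idx] += processing_times[job]
--         job_completion_times[job] = machine_loads[machine_idx]
--
--     return sum(job_completion_times)
-- ===== SOURCE B (Python) =====
-- # B: keep the machine loads as a SORTED pool of values with a running total: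
-- # the least-loaded machine is always the pool's head, so the per-job min/index
-- # scans of A and the completion-times array disappear.  Same return value as A.
--
-- def _insert_sorted(c, xs):
--     # insert c into the sorted list xs, before the first element >= c
--     i = 0
--     while i < len(xs) and xs[i] < c:
--         i += 1
--     return xs[:i] + [c] + xs[i:]
--
--
-- def spt_scheduling(m, n, processing_times):
--     loads = [0] * m
--     total = 0
--     for p in sorted(processing_times[i] for i in range(n)):
--         c = loads[0] + p          # least-loaded machine finishes this job at c
--         total += c
--         loads = _insert_sorted(c, loads[1:])
--     return total
-- ===== Notes on version B (the rewrite author's own statement) =====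
-- stated objective: alternative
-- what changed: B keeps the machine loads as a sorted value pool with a running total, so the least-loaded machine is the pool head and A's per-job min scan, index scan and completion-times array disappear; B sorts the processing values directly instead of sorting job indices by key.
import Mathlib
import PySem

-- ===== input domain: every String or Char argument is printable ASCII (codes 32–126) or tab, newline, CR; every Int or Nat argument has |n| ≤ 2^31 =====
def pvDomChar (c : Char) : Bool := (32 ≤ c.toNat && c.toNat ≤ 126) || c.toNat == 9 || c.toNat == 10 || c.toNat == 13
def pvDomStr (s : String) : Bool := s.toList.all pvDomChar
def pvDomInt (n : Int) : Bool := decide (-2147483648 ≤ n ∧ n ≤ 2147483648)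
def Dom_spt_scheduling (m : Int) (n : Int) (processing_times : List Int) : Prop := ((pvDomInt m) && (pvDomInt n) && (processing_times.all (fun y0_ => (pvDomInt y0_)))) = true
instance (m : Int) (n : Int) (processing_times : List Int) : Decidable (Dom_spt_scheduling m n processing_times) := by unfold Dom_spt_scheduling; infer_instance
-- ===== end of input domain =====

-- B replaces A's per-job min/index scans and completion-times array by a sorted pool of
-- machine loads with a running total (objective: alternative structure, same cost class).

-- ===== PORT A =====
-- loop body of A's 'for job in sorted_jobs' (min(...) / .index(...) return none only
-- where Python raises; those inputs are excluded by Pre_spt_scheduling)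
def sptStepA (processing_times : List Int) (st : List Int × List Int) (job : Int) : List Int × List Int :=
  let ml := st.1
  let mn := (PySem.List.min? ml (fun x => x)).getD 0
  let machine_idx : Nat := (PySem.List.index? ml mn).getD 0
  let ml' := PySem.List.pySetD ml (machine_idx : Int)
      (PySem.List.pyGetD ml (machine_idx : Int) 0 + PySem.List.pyGetD processing_times job 0)
  (ml', PySem.List.pySetD st.2 job (PySem.List.pyGetD ml' (machine_idx : Int) 0))

def spt_scheduling (m : Int) (n : Int) (processing_times : List Int) : Int :=
  let sorted_jobs := PySem.List.sorted (PySem.List.pyRange 0 n 1)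
      (fun x => PySem.List.pyGetD processing_times x 0) false
  let machine_loads := PySem.List.pyRepeat [(0 : Int)] m
  let job_completion_times := PySem.List.pyRepeat [(0 : Int)] n
  (sorted_jobs.foldl (sptStepA processing_times) (machine_loads, job_completion_times)).2.sum

-- ===== PORT B =====
-- _insert_sorted: skip the elements < c (takeWhile), place c before the rest
def sptInsert (c : Int) (xs : List Int) : List Int :=
  xs.takeWhile (fun x => x < c) ++ c :: xs.dropWhile (fun x => x < c)

def sptStepB (st : Int × List Int) (p : Int) : Int × List Int :=
  let c := PySem.List.pyGetD st.2 0 0 + p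
  (st.1 + c, sptInsert c (PySem.List.slice st.2 (some 1) none))

def spt_scheduling_alt (m : Int) (n : Int) (processing_times : List Int) : Int :=
  let ps := PySem.List.sorted
      ((PySem.List.pyRange 0 n 1).map (fun i => PySem.List.pyGetD processing_times i 0))
      (fun x => x) false
  (ps.foldl sptStepB (0, PySem.List.pyRepeat [(0 : Int)] m)).1

-- ===== PRECONDITION & SPEC =====
-- excludes exactly the inputs where A raises: with at least one job, an index beyond
-- len(processing_times) (IndexError in the sort key) or no machine (min([]) ValueError)
def Pre_spt_scheduling (m : Int) (n : Int) (processing_times : List Int) : Prop :=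
  0 < n → (n ≤ (processing_times.length : Int) ∧ 0 < m)
instance (m : Int) (n : Int) (processing_times : List Int) : Decidable (Pre_spt_scheduling m n processing_times) := by unfold Pre_spt_scheduling; infer_instance

def pvWitness_spt_scheduling : Int × Int × List Int := (2, 3, [4, 1, 3])

def Spec_spt_scheduling (m : Int) (n : Int) (processing_times : List Int) (out : Int) : Prop := out = spt_scheduling_alt m n processing_times
instance (m : Int) (n : Int) (processing_times : List Int) (out : Int) : Decidable (Spec_spt_scheduling m n processing_times out) := by unfold Spec_spt_scheduling; infer_instance

-- ===== CLAIM (what is proved, stated in full; the proofs are below) =====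
def Claim_equal_spt_scheduling : Prop := ∀ (m : Int) (n : Int) (processing_times : List Int), Dom_spt_scheduling m n processing_times → Pre_spt_scheduling m n processing_times → Spec_spt_scheduling m n processing_times (spt_scheduling m n processing_times)

-- ===== LEMMAS AND PROOFS =====

-- B's _insert_sorted is Mathlib's orderedInsert for ≤
theorem sptInsert_eq (c : Int) (xs : List Int) :
    sptInsert c xs = List.orderedInsert (· ≤ ·) c xs := by
  have hp : (fun x : Int => decide (x < c)) = fun b : Int => decide ¬ c ≤ b := by
    funext x; simp
  rw [List.orderedInsert_eq_take_drop]
  unfold sptInsert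
  rw [hp]

-- min(machine_loads) is the head of any sorted rearrangement of machine_loads
theorem min?_head (ml : List Int) (d : Int) (ds : List Int) (hp : ml.Perm (d :: ds))
    (hs : (d :: ds).Pairwise (· ≤ ·)) : PySem.List.min? ml (fun x => x) = some d := by
  have hne : ml ≠ [] := by
    intro h; subst h
    have := hp.length_eq; simp at this
  obtain ⟨v, hv⟩ : ∃ v, PySem.List.min? ml (fun x => x) = some v := by
    cases h : PySem.List.min? ml (fun x => x) with
    | none => exact absurd ((PySem.List.min?_eq_none_iff ml _).mp h) hne
    | some v => exact ⟨v, rfl⟩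
  have hmem := PySem.List.min?_mem hv
  have hmin := PySem.List.min?_isMin hv
  have hvd : v ≤ d := hmin d (hp.mem_iff.mpr (List.mem_cons_self))
  have hdv : d ≤ v := by
    rcases List.mem_cons.mp (hp.mem_iff.mp hmem) with h | h
    · omega
    · exact (List.pairwise_cons.mp hs).1 v h
  rw [hv]; congr 1; omega

-- writing v into a zero slot adds v to the sum
theorem sum_set_zero (l : List Int) (k : Nat) (v : Int) (h : k < l.length)
    (h0 : l.getD k 0 = 0) : (l.set k v).sum = l.sum + v := by
  have e1 : (l.set k v).sum = v + (l.eraseIdx k).sum := by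
    rw [(List.set_perm_cons_eraseIdx h v).sum_eq, List.sum_cons]
  have e2 : l.sum = l[k] + (l.eraseIdx k).sum := by
    rw [← List.sum_cons, (List.getElem_cons_eraseIdx_perm h).sum_eq]
  have e3 : l[k] = 0 := by rwa [List.getD_eq_getElem l 0 h] at h0
  omega

-- the two loops agree: A's machine_loads is always a rearrangement of B's sorted pool,
-- and A's writes into job_completion_times (fresh zero slots) sum to B's running total
theorem sptLoop (pt : List Int) (js : List Int) :
    ∀ (ml lds jct : List Int) (tot : Int),
    ml.Perm lds → lds.Pairwise (· ≤ ·) → lds ≠ [] → js.Nodup →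
    (∀ j ∈ js, 0 ≤ j ∧ j.toNat < jct.length ∧ jct.getD j.toNat 0 = 0) →
    ((js.foldl (sptStepA pt) (ml, jct)).2).sum + tot
      = jct.sum + ((js.map (fun x => PySem.List.pyGetD pt x 0)).foldl sptStepB (tot, lds)).1 := by
  induction js with
  | nil => intro ml lds jct tot _ _ _ _ _; simp
  | cons j rest ih =>
    intro ml lds jct tot hp hs hne hnd hjct
    obtain ⟨d, ds, rfl⟩ : ∃ d ds, lds = d :: ds := by
      cases lds with
      | nil => exact absurd rfl hne
      | cons d ds => exact ⟨d, ds, rfl⟩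
    obtain ⟨hj0, hjlen, hjval⟩ := hjct j (List.mem_cons_self)
    -- A's step
    have hmin : PySem.List.min? ml (fun x => x) = some d := min?_head ml d ds hp hs
    have hdml : d ∈ ml := hp.mem_iff.mpr (List.mem_cons_self)
    obtain ⟨k, hk⟩ : ∃ k, PySem.List.index? ml d = some k := by
      cases h : PySem.List.index? ml d with
      | none =>
        have := (PySem.List.index?_isSome_iff ml d).mpr hdml
        rw [h] at this; simp at this
      | some k => exact ⟨k, rfl⟩
    obtain ⟨hklen, hmlk, -⟩ := PySem.List.getElem_of_index?_eq_some hk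
    set p := PySem.List.pyGetD pt j 0 with hep
    set c := d + p with hec
    have g1 : ml.getD k 0 = d := by rw [List.getD_eq_getElem ml 0 hklen, hmlk]
    have g2 : (ml.set k c).getD k 0 = c := by
      rw [List.getD_eq_getElem _ 0 (by simpa using hklen), List.getElem_set_self]
    have hstepA : sptStepA pt (ml, jct) j = (ml.set k c, jct.set j.toNat c) := by
      simp only [sptStepA, hmin, Option.getD_some, hk, PySem.List.pySetD_natCast,
        PySem.List.pyGetD_natCast, PySem.List.pySetD_of_nonneg _ _ hj0, g1]
      rw [← hec, g2]
    -- B's step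
    have hstepB : sptStepB (tot, d :: ds) p = (tot + c, sptInsert c ds) := by
      unfold sptStepB
      simp [pysem, hec]
    -- the new pool: still a rearrangement of A's loads, sorted, nonempty
    have hperm' : (ml.set k c).Perm (sptInsert c ds) := by
      have h1 : (ml.set k c).Perm (c :: ml.eraseIdx k) := List.set_perm_cons_eraseIdx hklen c
      have h2 : (ml.eraseIdx k).Perm ds := by
        have h3 : (ml[k] :: ml.eraseIdx k).Perm ml := List.getElem_cons_eraseIdx_perm hklen
        rw [hmlk] at h3
        exact (h3.trans hp).cons_inv
      have h5 : (sptInsert c ds).Perm (c :: ds) := by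
        rw [sptInsert_eq]; exact List.perm_orderedInsert _ c ds
      exact h1.trans ((h2.cons c).trans h5.symm)
    have hsorted' : (sptInsert c ds).Pairwise (· ≤ ·) := by
      rw [sptInsert_eq]
      exact List.Pairwise.orderedInsert c ds (List.pairwise_cons.mp hs).2
    have hne' : sptInsert c ds ≠ [] := by simp [sptInsert]
    -- the new completion-time array: remaining slots still fresh zeros
    have hjct' : ∀ j' ∈ rest, 0 ≤ j' ∧ j'.toNat < (jct.set j.toNat c).length ∧
        (jct.set j.toNat c).getD j'.toNat 0 = 0 := by
      intro j' hj'
      obtain ⟨h0, h1, h2⟩ := hjct j' (List.mem_cons_of_mem _ hj')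
      have hne12 : j ≠ j' := by
        intro h; subst h; exact (List.nodup_cons.mp hnd).1 hj'
      refine ⟨h0, by simpa using h1, ?_⟩
      have hnn : j'.toNat ≠ j.toNat := by omega
      simp [List.getD, List.getElem?_set_ne hnn.symm] at h2 ⊢
      exact h2
    have hsum' : (jct.set j.toNat c).sum = jct.sum + c :=
      sum_set_zero jct j.toNat c hjlen hjval
    have ihx := ih (ml.set k c) (sptInsert c ds) (jct.set j.toNat c) (tot + c)
      hperm' hsorted' hne' (List.nodup_cons.mp hnd).2 hjct'
    simp only [List.foldl_cons, List.map_cons, hstepA, ← hep, hstepB]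
    omega

-- ===== VERDICT (by name: the statement is the Claim_ definition above) =====
theorem spt_scheduling_spec : Claim_equal_spt_scheduling := by
  intro m n pt _ hpre
  unfold Spec_spt_scheduling spt_scheduling spt_scheduling_alt
  by_cases hn : n ≤ 0
  · rw [PySem.List.pyRange_one_eq_nil hn]
    simp [PySem.List.pyRepeat_singleton, (PySem.List.sorted_eq_nil_iff _ _ _).mpr rfl]
  · push Not at hn
    obtain ⟨hlen, hm⟩ := hpre hn
    have hJperm := PySem.List.sorted_perm (PySem.List.pyRange 0 n 1)
      (fun x => PySem.List.pyGetD pt x 0) false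
    have hJnd := (hJperm.nodup_iff).mpr (PySem.List.nodup_pyRange_one 0 n)
    have hps : PySem.List.sorted
        ((PySem.List.pyRange 0 n 1).map (fun i => PySem.List.pyGetD pt i 0)) (fun x => x) false
        = (PySem.List.sorted (PySem.List.pyRange 0 n 1)
            (fun x => PySem.List.pyGetD pt x 0) false).map (fun x => PySem.List.pyGetD pt x 0) :=
      PySem.List.sorted_id_eq_of_perm_of_pairwise _ _
        (hJperm.map _) (PySem.List.sorted_map_key_pairwise _ _)
    have hjct0 : ∀ j ∈ PySem.List.sorted (PySem.List.pyRange 0 n 1)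
        (fun x => PySem.List.pyGetD pt x 0) false,
        0 ≤ j ∧ j.toNat < (List.replicate n.toNat (0 : Int)).length ∧
          (List.replicate n.toNat (0 : Int)).getD j.toNat 0 = 0 := by
      intro j hj
      obtain ⟨h0, h1⟩ := PySem.List.mem_pyRange_one.mp
        ((PySem.List.mem_sorted _ _ _ _).mp hj)
      refine ⟨h0, by simp; omega, ?_⟩
      simp [List.getD, List.getElem?_replicate]
      split <;> rfl
    have hne0 : List.replicate m.toNat (0 : Int) ≠ [] := by
      intro h; rw [List.replicate_eq_nil_iff] at h; omega
    have hloop := sptLoop pt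
      (PySem.List.sorted (PySem.List.pyRange 0 n 1) (fun x => PySem.List.pyGetD pt x 0) false)
      (List.replicate m.toNat 0) (List.replicate m.toNat 0) (List.replicate n.toNat 0) 0
      (List.Perm.refl _) (List.pairwise_replicate_of_refl) hne0 hJnd hjct0
    simp only [List.sum_replicate, smul_zero, add_zero, zero_add] at hloop
    rw [PySem.List.pyRepeat_singleton, PySem.List.pyRepeat_singleton, hps, hloop]
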